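-- pv_equiv track=rewrite | github.com/Bryan-Nsoh/agent-talk-2 | src/llmgrid/env/simulate.py | _compute_contended_mask
-- ===== SOURCE A (Python) =====
-- from typing import Any, Dict, Iterable, List, Literal, Optional, TextIO, Tuple
--
-- def _compute_contended_mask(position: Tuple[int, int], contested_cells: Iterable[Optional[Tuple[int, int]]]) -> int:
--     """Return a NESW bitmask for contested neighbour cells relative to `position`."""
--
--     if not contested_cells:
--         return 0
--
--     x, y = position
--     mask = 0
--     for cell in contested_cells:
--         if cell is None:
--             continue
--         cx, cy = cell
--         dx = cx - x
--         dy = cy - y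
--         if dx == 0 and dy == -1:
--             mask |= 0b0001  # north
--         elif dx == 1 and dy == 0:
--             mask |= 0b0010  # east
--         elif dx == 0 and dy == 1:
--             mask |= 0b0100  # south
--         elif dx == -1 and dy == 0:
--             mask |= 0b1000  # west
--     return mask
-- ===== SOURCE B (Python) =====
-- def _compute_contended_mask(position, contested_cells):
--     cells = {c for c in contested_cells if c is not None}
--     x, y = position
--     mask = 0
--     if (x, y - 1) in cells:
--         mask |= 0b0001  # north
--     if (x + 1, y) in cells:
--         mask |= 0b0010  # east
--     if (x, y + 1) in cells:
--         mask |= 0b0100  # south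
--     if (x - 1, y) in cells:
--         mask |= 0b1000  # west
--     return mask
-- ===== Notes on version B (the rewrite author's own statement) =====
-- stated objective: simpler
-- what changed: Instead of scanning every contested cell and classifying its offset with a branch chain, B collects the non-None cells into a set and probes the four fixed neighbour coordinates of the position, OR-ing in each direction bit on membership.
import Mathlib
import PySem

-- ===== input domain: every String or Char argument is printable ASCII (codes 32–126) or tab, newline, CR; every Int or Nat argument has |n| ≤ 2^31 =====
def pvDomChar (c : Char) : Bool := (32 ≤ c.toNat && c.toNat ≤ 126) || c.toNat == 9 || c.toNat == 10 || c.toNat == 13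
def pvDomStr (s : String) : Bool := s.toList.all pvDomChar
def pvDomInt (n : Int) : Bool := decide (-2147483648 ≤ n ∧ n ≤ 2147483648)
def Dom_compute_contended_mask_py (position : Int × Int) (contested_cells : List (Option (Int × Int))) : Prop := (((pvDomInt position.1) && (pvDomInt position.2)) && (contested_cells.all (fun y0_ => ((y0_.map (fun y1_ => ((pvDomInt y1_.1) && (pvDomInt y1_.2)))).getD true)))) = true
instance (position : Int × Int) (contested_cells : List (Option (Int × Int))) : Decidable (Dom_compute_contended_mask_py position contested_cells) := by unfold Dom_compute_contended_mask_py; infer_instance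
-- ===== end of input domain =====

-- B collects the non-None cells into a set and probes the four fixed neighbour coordinates,
-- instead of A's scan that classifies each cell's offset with a branch chain (objective: simpler).

-- ===== PORT A =====
def compute_contended_mask_py (position : Int × Int) (contested_cells : List (Option (Int × Int))) : Int :=
  if contested_cells.isEmpty then 0
  else
    let x := position.1
    let y := position.2
    contested_cells.foldl (fun mask cell =>
      match cell with
      | none => mask
      | some (cx, cy) =>
        let dx := cx - x
        let dy := cy - y
        if dx = 0 ∧ dy = -1 then PySem.Int.bor mask 1        -- north
        else if dx = 1 ∧ dy = 0 then PySem.Int.bor mask 2    -- east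
        else if dx = 0 ∧ dy = 1 then PySem.Int.bor mask 4    -- south
        else if dx = -1 ∧ dy = 0 then PySem.Int.bor mask 8   -- west
        else mask) 0

-- ===== PORT B =====
def compute_contended_mask_py_alt (position : Int × Int) (contested_cells : List (Option (Int × Int))) : Int :=
  let cells : PySem.Set (Int × Int) := PySem.Set.ofList (contested_cells.filterMap id)
  let x := position.1
  let y := position.2
  let mask : Int := 0
  let mask := if PySem.Set.contains cells (x, y - 1) then PySem.Int.bor mask 1 else mask   -- north
  let mask := if PySem.Set.contains cells (x + 1, y) then PySem.Int.bor mask 2 else mask   -- east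
  let mask := if PySem.Set.contains cells (x, y + 1) then PySem.Int.bor mask 4 else mask   -- south
  let mask := if PySem.Set.contains cells (x - 1, y) then PySem.Int.bor mask 8 else mask   -- west
  mask

-- ===== PRECONDITION & SPEC =====
def Spec_compute_contended_mask_py (position : Int × Int) (contested_cells : List (Option (Int × Int))) (out : Int) : Prop := out = compute_contended_mask_py_alt position contested_cells
instance (position : Int × Int) (contested_cells : List (Option (Int × Int))) (out : Int) : Decidable (Spec_compute_contended_mask_py position contested_cells out) := by unfold Spec_compute_contended_mask_py; infer_instance

-- ===== CLAIM (what is proved, stated in full; the proofs are below) =====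
def Claim_equal_compute_contended_mask_py : Prop := ∀ (position : Int × Int) (contested_cells : List (Option (Int × Int))), Dom_compute_contended_mask_py position contested_cells → Spec_compute_contended_mask_py position contested_cells (compute_contended_mask_py position contested_cells)

-- ===== LEMMAS AND PROOFS =====

/-- The mask as a function of the four direction booleans (the bits are disjoint). -/
def pvMval (n e s w : Bool) : Int :=
  (if n then 1 else 0) + (if e then 2 else 0) + (if s then 4 else 0) + (if w then 8 else 0)

theorem pvMval_or1 (n e s w : Bool) : PySem.Int.bor (pvMval n e s w) 1 = pvMval true e s w := by
  revert n e s w; decide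

theorem pvMval_or2 (n e s w : Bool) : PySem.Int.bor (pvMval n e s w) 2 = pvMval n true s w := by
  revert n e s w; decide

theorem pvMval_or4 (n e s w : Bool) : PySem.Int.bor (pvMval n e s w) 4 = pvMval n e true w := by
  revert n e s w; decide

theorem pvMval_or8 (n e s w : Bool) : PySem.Int.bor (pvMval n e s w) 8 = pvMval n e s true := by
  revert n e s w; decide

/-- Invariant of A's fold: starting from `pvMval n e s w`, the fold sets each direction
    bit iff the corresponding neighbour occurs in the remaining list. -/
theorem pvFold_char (x y : Int) :
    ∀ (l : List (Option (Int × Int))) (n e s w : Bool),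
      l.foldl (fun mask cell =>
        match cell with
        | none => mask
        | some (cx, cy) =>
          if cx - x = 0 ∧ cy - y = -1 then PySem.Int.bor mask 1
          else if cx - x = 1 ∧ cy - y = 0 then PySem.Int.bor mask 2
          else if cx - x = 0 ∧ cy - y = 1 then PySem.Int.bor mask 4
          else if cx - x = -1 ∧ cy - y = 0 then PySem.Int.bor mask 8
          else mask) (pvMval n e s w)
      = pvMval (n || l.contains (some (x, y - 1))) (e || l.contains (some (x + 1, y)))
               (s || l.contains (some (x, y + 1))) (w || l.contains (some (x - 1, y))) := by
  intro l
  induction l with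
  | nil => intro n e s w; simp
  | cons c t ih =>
    intro n e s w
    match c with
    | none =>
      simp only [List.foldl_cons, List.contains_cons]
      rw [ih]
      simp
    | some (cx, cy) =>
      have eN : ((some (x, y - 1) : Option (Int × Int)) == some (cx, cy))
          = decide (cx = x ∧ cy = y - 1) := by
        by_cases h : cx = x ∧ cy = y - 1 <;> simp [h, Prod.ext_iff] <;> omega
      have eE : ((some (x + 1, y) : Option (Int × Int)) == some (cx, cy))
          = decide (cx = x + 1 ∧ cy = y) := by
        by_cases h : cx = x + 1 ∧ cy = y <;> simp [h, Prod.ext_iff] <;> omega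
      have eS : ((some (x, y + 1) : Option (Int × Int)) == some (cx, cy))
          = decide (cx = x ∧ cy = y + 1) := by
        by_cases h : cx = x ∧ cy = y + 1 <;> simp [h, Prod.ext_iff] <;> omega
      have eW : ((some (x - 1, y) : Option (Int × Int)) == some (cx, cy))
          = decide (cx = x - 1 ∧ cy = y) := by
        by_cases h : cx = x - 1 ∧ cy = y <;> simp [h, Prod.ext_iff] <;> omega
      simp only [List.foldl_cons, List.contains_cons, eN, eE, eS, eW]
      by_cases hN : cx = x ∧ cy = y - 1
      · have hE : ¬(cx = x + 1 ∧ cy = y) := by omega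
        have hS : ¬(cx = x ∧ cy = y + 1) := by omega
        have hW : ¬(cx = x - 1 ∧ cy = y) := by omega
        rw [if_pos (show cx - x = 0 ∧ cy - y = -1 by omega), pvMval_or1, ih]
        simp only [decide_eq_true hN, decide_eq_false hE, decide_eq_false hS,
          decide_eq_false hW]
        simp
      · by_cases hE : cx = x + 1 ∧ cy = y
        · have hS : ¬(cx = x ∧ cy = y + 1) := by omega
          have hW : ¬(cx = x - 1 ∧ cy = y) := by omega
          rw [if_neg (by omega), if_pos (show cx - x = 1 ∧ cy - y = 0 by omega),
            pvMval_or2, ih]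
          simp only [decide_eq_false hN, decide_eq_true hE, decide_eq_false hS,
            decide_eq_false hW]
          simp
        · by_cases hS : cx = x ∧ cy = y + 1
          · have hW : ¬(cx = x - 1 ∧ cy = y) := by omega
            rw [if_neg (by omega), if_neg (by omega),
              if_pos (show cx - x = 0 ∧ cy - y = 1 by omega), pvMval_or4, ih]
            simp only [decide_eq_false hN, decide_eq_false hE, decide_eq_true hS,
              decide_eq_false hW]
            simp
          · by_cases hW : cx = x - 1 ∧ cy = y
            · rw [if_neg (by omega), if_neg (by omega), if_neg (by omega),
                if_pos (show cx - x = -1 ∧ cy - y = 0 by omega), pvMval_or8, ih]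
              simp only [decide_eq_false hN, decide_eq_false hE, decide_eq_false hS,
                decide_eq_true hW]
              simp
            · rw [if_neg (by omega), if_neg (by omega), if_neg (by omega),
                if_neg (by omega), ih]
              simp only [decide_eq_false hN, decide_eq_false hE, decide_eq_false hS,
                decide_eq_false hW]
              simp

theorem pvA_char (position : Int × Int) (l : List (Option (Int × Int))) :
    compute_contended_mask_py position l
      = pvMval (l.contains (some (position.1, position.2 - 1)))
               (l.contains (some (position.1 + 1, position.2)))
               (l.contains (some (position.1, position.2 + 1)))
               (l.contains (some (position.1 - 1, position.2))) := by
  unfold compute_contended_mask_py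
  by_cases hl : l.isEmpty
  · rw [if_pos hl]
    rw [List.isEmpty_iff] at hl
    subst hl
    rfl
  · rw [if_neg hl]
    have h := pvFold_char position.1 position.2 l false false false false
    simpa using h

theorem pvContains_set (l : List (Option (Int × Int))) (k : Int × Int) :
    PySem.Set.contains (PySem.Set.ofList (l.filterMap id)) k = l.contains (some k) := by
  have hm : (k ∈ PySem.Set.ofList (l.filterMap id)) ↔ some k ∈ l := by
    rw [PySem.Set.mem_ofList]
    constructor
    · intro h
      rcases List.mem_filterMap.mp h with ⟨a, ha, hid⟩
      cases a with
      | none => cases hid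
      | some b => cases hid; exact ha
    · intro h
      exact List.mem_filterMap.mpr ⟨some k, h, rfl⟩
  rw [Bool.eq_iff_iff]
  simp only [PySem.Set.contains]
  rw [List.contains_iff_mem, List.contains_iff_mem]
  exact hm

theorem pvB_char (position : Int × Int) (l : List (Option (Int × Int))) :
    compute_contended_mask_py_alt position l
      = pvMval (l.contains (some (position.1, position.2 - 1)))
               (l.contains (some (position.1 + 1, position.2)))
               (l.contains (some (position.1, position.2 + 1)))
               (l.contains (some (position.1 - 1, position.2))) := by
  unfold compute_contended_mask_py_alt
  simp only [pvContains_set]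
  rcases h1 : l.contains (some (position.1, position.2 - 1)) with _ | _ <;>
    rcases h2 : l.contains (some (position.1 + 1, position.2)) with _ | _ <;>
      rcases h3 : l.contains (some (position.1, position.2 + 1)) with _ | _ <;>
        rcases h4 : l.contains (some (position.1 - 1, position.2)) with _ | _ <;>
          decide

-- ===== VERDICT (by name: the statement is the Claim_ definition above) =====
theorem compute_contended_mask_py_spec : Claim_equal_compute_contended_mask_py := by
  intro position contested_cells _
  unfold Spec_compute_contended_mask_py
  rw [pvA_char, pvB_char]
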